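-- pv_equiv track=rewrite | github.com/JeanMainguy/viral_polyprotein_annotation | scripts/cluster_evaluation/taxonomic_homogeneity_checking.py | getValidBranches
-- ===== SOURCE A (Python) =====
-- def getValidBranches(last_common_node, current_shared_taxonomy, taxonomy_set):
--
--     valid_branches = set()
--     for tax in taxonomy_set:
--         if last_common_node in tax:
--             i_last = tax.index(last_common_node)
--
--             if len(tax) > i_last+1:
--                 valid_branches.add(tax[i_last+1])
--
--
--
--     if not valid_branches: # there is no better defined node in the cluster than the last_common_node
--         return {last_common_node} # last common node is the node use to compute homogeneity
--
--     if len(valid_branches) > 1: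
--         return valid_branches
--
--     if len(valid_branches) == 1:
--         # only one branch is in valid_branches which mean some genome are attached to last_common_node and all the other
--         # ones have the better defined node of valid branch. which means we find potential valid branches in the valid ranch node
--         last_common_node_from_valid_branch = valid_branches.pop()
--
--         return getValidBranches(last_common_node_from_valid_branch, current_shared_taxonomy, taxonomy_set)
-- ===== SOURCE B (Python) =====
-- def getValidBranches(last_common_node, current_shared_taxonomy, taxonomy_set):
--     # Precompute, in ONE pass over the data, the set of "next" nodes after the
--     # first occurrence of every node, then walk the unique-continuation chain
--     # with a single pointer instead of rescanning all rows at every recursion.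
--     succ = {}
--     for tax in taxonomy_set:
--         seen = set()
--         for x, y in zip(tax, tax[1:]):
--             if x not in seen:
--                 succ.setdefault(x, set()).add(y)
--                 seen.add(x)
--     node = last_common_node
--     while True:
--         s = succ.get(node, set())
--         if not s:
--             return {node}
--         if len(s) > 1:
--             return s
--         node = next(iter(s))
-- ===== Notes on version B (the rewrite author's own statement) =====
-- stated objective: alternative
-- what changed: B builds a first-occurrence successor dictionary in a single pass over the rows and then follows the unique-continuation chain with one pointer, instead of A rescanning every row (membership test plus list.index) at each recursion step; it trades per-step rescans for one precomputed index.
import Mathlib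
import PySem

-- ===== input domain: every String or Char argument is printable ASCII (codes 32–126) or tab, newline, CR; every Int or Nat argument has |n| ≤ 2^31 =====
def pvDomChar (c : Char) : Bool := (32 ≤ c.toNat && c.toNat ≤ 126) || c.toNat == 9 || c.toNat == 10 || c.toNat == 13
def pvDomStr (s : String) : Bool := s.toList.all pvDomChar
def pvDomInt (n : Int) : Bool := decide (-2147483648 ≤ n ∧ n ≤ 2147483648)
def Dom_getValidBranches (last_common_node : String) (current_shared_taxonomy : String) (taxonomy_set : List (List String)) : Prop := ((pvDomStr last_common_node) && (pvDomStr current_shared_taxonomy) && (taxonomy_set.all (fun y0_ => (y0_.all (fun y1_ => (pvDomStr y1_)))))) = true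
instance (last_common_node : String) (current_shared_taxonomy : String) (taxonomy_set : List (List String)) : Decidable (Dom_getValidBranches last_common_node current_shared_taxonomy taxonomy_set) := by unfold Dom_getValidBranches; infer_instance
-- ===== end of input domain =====

-- B replaces A's per-recursion rescan of all rows (with list.index in each) by one
-- precomputed first-occurrence successor dictionary and a single pointer walk down the chain (alternative algorithm, similar measured cost).

-- ===== PORT A =====
-- body of A's 'for tax in taxonomy_set' loop (membership test, .index, bound check, set.add)
def pvStepA (vb : PySem.Set String) (tax : List String) (node : String) : PySem.Set String :=
  if tax.contains node then
    match PySem.List.index? tax node with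
    | some i => if tax.length > i + 1 then PySem.Set.add vb (tax.getD (i + 1) "") else vb
    | none => vb
  else vb

def pvBranchesA (tss : List (List String)) (node : String) : PySem.Set String :=
  tss.foldl (fun vb tax => pvStepA vb tax node) PySem.Set.empty

-- A's recursion, fueled only to make it total in Lean (A can recurse forever; Pre_ excludes that)
def pvGoA (tss : List (List String)) : Nat → String → List String
  | 0, _ => []
  | n + 1, node =>
    let vb := pvBranchesA tss node
    if vb = [] then [node]
    else if 1 < vb.length then vb
    else pvGoA tss n (vb.headD "")   -- singleton set: .pop() is its unique element

def getValidBranches (last_common_node : String) (_current_shared_taxonomy : String) (taxonomy_set : List (List String)) : List String :=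
  pvGoA taxonomy_set (taxonomy_set.flatten.length + 1) last_common_node

-- ===== PORT B =====
-- B's inner row loop: for x, y in zip(tax, tax[1:]): if x not in seen: succ.setdefault(x, set()).add(y); seen.add(x)
def pvRowB (d : PySem.Dict String (PySem.Set String)) (tax : List String) : PySem.Dict String (PySem.Set String) :=
  ((tax.zip (tax.drop 1)).foldl
    (fun (st : PySem.Dict String (PySem.Set String) × PySem.Set String) p =>
      if st.2.contains p.1 then st
      else (st.1.insert p.1 (PySem.Set.add (st.1.getD p.1 PySem.Set.empty) p.2), PySem.Set.add st.2 p.1))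
    (d, PySem.Set.empty)).1

def pvSuccB (tss : List (List String)) : PySem.Dict String (PySem.Set String) :=
  tss.foldl pvRowB PySem.Dict.empty

-- B's 'while True' pointer walk, fueled for totality exactly like A's recursion
def pvWalkB (succ : PySem.Dict String (PySem.Set String)) : Nat → String → List String
  | 0, _ => []
  | n + 1, node =>
    let s := succ.getD node PySem.Set.empty
    if s = [] then [node]
    else if 1 < s.length then s
    else pvWalkB succ n (s.headD "")   -- next(iter(s)) of a singleton set

def getValidBranches_alt (last_common_node : String) (_current_shared_taxonomy : String) (taxonomy_set : List (List String)) : List String :=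
  pvWalkB (pvSuccB taxonomy_set) (taxonomy_set.flatten.length + 1) last_common_node

-- ===== PRECONDITION & SPEC =====
-- successor of the first occurrence of node in one row (used only by Pre_ and the proofs)
def pvFirstSucc : List String → String → Option String
  | [], _ => none
  | x :: rest, node => if x = node then rest.head? else pvFirstSucc rest node

def pvSuccsOf (tss : List (List String)) (node : String) : List String :=
  PySem.List.dedup (tss.filterMap (fun t => pvFirstSucc t node))

def pvChainStep (tss : List (List String)) (node : String) : String :=
  match pvSuccsOf tss node with
  | [y] => y
  | _ => node

-- Pre_ excludes exactly the inputs on which the unique-successor chain from last_common_node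
-- never leaves the singleton case (a cycle), where Python A raises RecursionError.
def Pre_getValidBranches (last_common_node : String) (current_shared_taxonomy : String) (taxonomy_set : List (List String)) : Prop :=
  ∃ k ∈ List.range (taxonomy_set.flatten.length + 1),
    (pvSuccsOf taxonomy_set ((pvChainStep taxonomy_set)^[k] last_common_node)).length ≠ 1

instance (last_common_node : String) (current_shared_taxonomy : String) (taxonomy_set : List (List String)) : Decidable (Pre_getValidBranches last_common_node current_shared_taxonomy taxonomy_set) := by unfold Pre_getValidBranches; infer_instance

def pvWitness_getValidBranches : String × String × List (List String) := ("a", "", [["a", "b"]])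

def Spec_getValidBranches (last_common_node : String) (current_shared_taxonomy : String) (taxonomy_set : List (List String)) (out : List String) : Prop := out = getValidBranches_alt last_common_node current_shared_taxonomy taxonomy_set
instance (last_common_node : String) (current_shared_taxonomy : String) (taxonomy_set : List (List String)) (out : List String) : Decidable (Spec_getValidBranches last_common_node current_shared_taxonomy taxonomy_set out) := by unfold Spec_getValidBranches; infer_instance

-- ===== CLAIM (what is proved, stated in full; the proofs are below) =====
def Claim_equal_getValidBranches : Prop := ∀ (last_common_node : String) (current_shared_taxonomy : String) (taxonomy_set : List (List String)), Dom_getValidBranches last_common_node current_shared_taxonomy taxonomy_set → Pre_getValidBranches last_common_node current_shared_taxonomy taxonomy_set → Spec_getValidBranches last_common_node current_shared_taxonomy taxonomy_set (getValidBranches last_common_node current_shared_taxonomy taxonomy_set)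

-- ===== LEMMAS AND PROOFS =====

-- A's per-row step adds exactly the successor of the first occurrence
theorem pvStepA_eq (tax : List String) (vb : PySem.Set String) (node : String) :
    pvStepA vb tax node =
      match pvFirstSucc tax node with
      | some y => PySem.Set.add vb y
      | none => vb := by
  induction tax with
  | nil => rfl
  | cons x rest ih =>
    by_cases hx : x = node
    · subst hx
      rw [pvStepA, pvFirstSucc]
      simp only [List.contains_cons, BEq.rfl, Bool.true_or, if_pos]
      rw [PySem.List.index?_cons_self]
      cases rest with
      | nil => simp
      | cons y r => simp [List.head?]
    · rw [pvStepA, pvFirstSucc, if_neg hx, ← ih, pvStepA]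
      have hc : (x :: rest).contains node = rest.contains node := by
        simp only [List.contains_cons, Bool.or_eq_right_iff_imp]
        intro h
        exact absurd (eq_of_beq h).symm hx
      rw [hc]
      by_cases hm : rest.contains node = true
      · rw [if_pos hm, if_pos hm, PySem.List.index?_cons_of_ne rest hx]
        cases hio : PySem.List.index? rest node with
        | none => rfl
        | some i =>
          simp only [Option.map_some]
          have hlen : ((x :: rest).length > i + 1 + 1) ↔ (rest.length > i + 1) := by
            simp [List.length_cons]
          by_cases hg : rest.length > i + 1
          · rw [if_pos (hlen.mpr hg), if_pos hg]
            simp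
          · rw [if_neg (fun h => hg (hlen.mp h)), if_neg hg]
      · rw [if_neg hm, if_neg hm]

-- B's per-row dict update, seen through getD, performs A's per-row step
theorem pvRowAux (tax : List String) (d : PySem.Dict String (PySem.Set String)) (seen : PySem.Set String) (node : String) :
    ((tax.zip (tax.drop 1)).foldl
      (fun (st : PySem.Dict String (PySem.Set String) × PySem.Set String) p =>
        if st.2.contains p.1 then st
        else (st.1.insert p.1 (PySem.Set.add (st.1.getD p.1 PySem.Set.empty) p.2), PySem.Set.add st.2 p.1))
      (d, seen)).1.getD node PySem.Set.empty =
      if node ∈ seen then d.getD node PySem.Set.empty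
      else match pvFirstSucc tax node with
        | some y => PySem.Set.add (d.getD node PySem.Set.empty) y
        | none => d.getD node PySem.Set.empty := by
  induction tax generalizing d seen with
  | nil => simp [pvFirstSucc]
  | cons x rest ih =>
    cases rest with
    | nil =>
      simp only [List.drop_succ_cons, List.drop_nil, List.zip_nil_right, List.foldl_nil]
      by_cases hxn : x = node <;> simp [pvFirstSucc, hxn]
    | cons y r =>
      have hz : (x :: y :: r).zip ((x :: y :: r).drop 1) = (x, y) :: ((y :: r).zip ((y :: r).drop 1)) := by
        simp
      rw [hz, List.foldl_cons]
      by_cases hx : PySem.Set.contains seen x = true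
      · rw [if_pos hx]  -- hmm the if is on st.2.contains; st = (d,seen)
        rw [ih d seen]
        by_cases hns : node ∈ seen
        · rw [if_pos hns, if_pos hns]
        · rw [if_neg hns, if_neg hns]
          have hxn : x ≠ node := fun h => hns (h ▸ (PySem.Set.contains_iff seen x).mp hx)
          simp [pvFirstSucc, hxn]
      · rw [if_neg hx]
        rw [ih _ _]
        have hxs : x ∉ seen := fun h => hx ((PySem.Set.contains_iff seen x).mpr h)
        by_cases hns : node ∈ seen
        · have hne : node ≠ x := fun h => hxs (h ▸ hns)
          rw [if_pos ((PySem.Set.mem_add seen x node).mpr (Or.inl hns)), if_pos hns,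
              PySem.Dict.getD_insert, if_neg hne]
        · by_cases hnx : node = x
          · subst hnx
            rw [if_pos ((PySem.Set.mem_add seen node node).mpr (Or.inr rfl)),
                PySem.Dict.getD_insert, if_pos rfl, if_neg hns, pvFirstSucc, if_pos rfl]
            rfl
          · have hnm : node ∉ PySem.Set.add seen x := fun h =>
              ((PySem.Set.mem_add seen x node).mp h).elim hns hnx
            rw [if_neg hnm, if_neg hns, PySem.Dict.getD_insert, if_neg hnx]
            have hxn' : x ≠ node := Ne.symm hnx
            simp [pvFirstSucc, hxn']

theorem pvRowB_getD (tax : List String) (d : PySem.Dict String (PySem.Set String)) (node : String) :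
    (pvRowB d tax).getD node PySem.Set.empty = pvStepA (d.getD node PySem.Set.empty) tax node := by
  rw [pvRowB, pvRowAux, pvStepA_eq]
  simp [PySem.Set.empty]

theorem pvFold_getD (rows : List (List String)) (d : PySem.Dict String (PySem.Set String)) (node : String) :
    (rows.foldl pvRowB d).getD node PySem.Set.empty =
      rows.foldl (fun vb tax => pvStepA vb tax node) (d.getD node PySem.Set.empty) := by
  induction rows generalizing d with
  | nil => rfl
  | cons t rs ih => rw [List.foldl_cons, List.foldl_cons, ih, pvRowB_getD]

theorem pvSuccB_getD (tss : List (List String)) (node : String) :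
    (pvSuccB tss).getD node PySem.Set.empty = pvBranchesA tss node := by
  rw [pvSuccB, pvBranchesA, pvFold_getD, PySem.Dict.getD_empty]

theorem pvWalkB_eq_pvGoA (tss : List (List String)) (n : Nat) (node : String) :
    pvWalkB (pvSuccB tss) n node = pvGoA tss n node := by
  induction n generalizing node with
  | zero => rfl
  | succ n ih =>
    simp only [pvWalkB, pvGoA, pvSuccB_getD, ih]

-- ===== VERDICT (by name: the statement is the Claim_ definition above) =====
theorem getValidBranches_spec : Claim_equal_getValidBranches := by
  intro lcn cst tss _ _
  unfold Spec_getValidBranches getValidBranches getValidBranches_alt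
  exact (pvWalkB_eq_pvGoA tss _ lcn).symm
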